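-- pv_equiv track=rewrite | github.com/LorenzHW/Coding-Competitions | code_jam/2019/round_1-b/3_problem/fair_fight.py | solve
-- ===== SOURCE A (Python) =====
-- def solve(k, charles_skill, delilas_skill):
--     charles = generate_cont_subarrays(charles_skill)
--     delila = generate_cont_subarrays(delilas_skill)
--
--     pairs = 0
--     for i in range(len(charles)):
--         charles_sword_skill = max(charles[i])
--         delilas_sword_skill = max(delila[i])
--
--         if abs(charles_sword_skill - delilas_sword_skill) <= k:
--             pairs += 1
--     return pairs
--
-- def generate_cont_subarrays(array):
--     sub_arrays = []
--     for windows_size in range(1, len(array) + 1):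
--         for i in range(len(array) - windows_size + 1):
--             sub_arrays.append(array[i:i + windows_size])
--     return sub_arrays
-- ===== SOURCE B (Python) =====
-- def solve(k, charles_skill, delilas_skill):
--     pairs = 0
--     for c, d in zip(window_maxima(charles_skill), window_maxima(delilas_skill)):
--         if abs(c - d) <= k:
--             pairs += 1
--     return pairs
--
-- def window_maxima(array):
--     # Sliding-window maxima by dynamic programming: row w holds the maxima of all
--     # width-w windows, computed from row w-1 in O(n); widths are emitted in order.
--     out = []
--     row = list(array)
--     for w in range(1, len(array) + 1):
--         out.extend(row)
--         row = [max(row[s], array[s + w]) for s in range(len(array) - w)]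
--     return out
-- ===== Notes on version B (the rewrite author's own statement) =====
-- stated objective: faster
-- what changed: B never materializes the O(n^2) subarrays: it computes each array's window maxima row-by-row by dynamic programming (row w from row w-1 in O(n)) and counts matches over the zipped maxima streams.
import Mathlib
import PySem

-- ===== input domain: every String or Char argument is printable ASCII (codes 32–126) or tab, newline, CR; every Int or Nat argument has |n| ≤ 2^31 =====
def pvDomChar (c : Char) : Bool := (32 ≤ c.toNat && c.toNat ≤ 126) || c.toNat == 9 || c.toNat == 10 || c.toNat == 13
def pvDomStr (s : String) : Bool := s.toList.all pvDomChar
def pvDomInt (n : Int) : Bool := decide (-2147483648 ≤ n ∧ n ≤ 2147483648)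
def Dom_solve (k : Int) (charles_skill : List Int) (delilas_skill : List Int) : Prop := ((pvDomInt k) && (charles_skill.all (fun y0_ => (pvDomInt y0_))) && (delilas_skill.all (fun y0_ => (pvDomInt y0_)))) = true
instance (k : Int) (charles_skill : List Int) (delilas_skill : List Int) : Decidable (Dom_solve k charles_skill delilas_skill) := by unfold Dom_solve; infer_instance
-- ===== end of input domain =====

-- B replaces A's O(n^3) enumerate-all-subarrays-and-take-max with an O(n^2) DP on window maxima
-- (row w is computed from row w-1), zipping the two maxima streams; same return value on Pre_.

-- ===== PORT A =====
def generate_cont_subarrays (array : List Int) : List (List Int) :=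
  (PySem.List.pyRange 1 ((array.length : Int) + 1) 1).foldl
    (fun sub_arrays windows_size =>
      (PySem.List.pyRange 0 ((array.length : Int) - windows_size + 1) 1).foldl
        (fun acc i => acc ++ [PySem.List.slice array (some i) (some (i + windows_size))])
        sub_arrays)
    []

def solve (k : Int) (charles_skill : List Int) (delilas_skill : List Int) : Int :=
  let charles := generate_cont_subarrays charles_skill
  let delila := generate_cont_subarrays delilas_skill
  -- max(list): the slices are nonempty, so max? is some; delila[i] is in range by Pre_solve
  (PySem.List.pyRange 0 (charles.length : Int) 1).foldl
    (fun pairs i =>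
      if |(PySem.List.max? (PySem.List.pyGetD charles i []) (fun y => y)).getD 0 -
          (PySem.List.max? (PySem.List.pyGetD delila i []) (fun y => y)).getD 0| ≤ k
      then pairs + 1 else pairs)
    0

-- ===== PORT B =====
def window_maxima (array : List Int) : List Int :=
  ((PySem.List.pyRange 1 ((array.length : Int) + 1) 1).foldl
    (fun (st : List Int × List Int) w =>
      (st.1 ++ st.2,
       (PySem.List.pyRange 0 ((array.length : Int) - w) 1).map
         (fun s => max (PySem.List.pyGetD st.2 s 0) (PySem.List.pyGetD array (s + w) 0))))
    ([], array)).1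

def solve_alt (k : Int) (charles_skill : List Int) (delilas_skill : List Int) : Int :=
  ((window_maxima charles_skill).zip (window_maxima delilas_skill)).foldl
    (fun pairs cd => if |cd.1 - cd.2| ≤ k then pairs + 1 else pairs)
    0

-- ===== PRECONDITION & SPEC =====
-- Pre_ excludes exactly the inputs where A raises IndexError: when charles_skill is longer than
-- delilas_skill, delila[i] runs out of subarrays inside A's loop.
def Pre_solve (k : Int) (charles_skill : List Int) (delilas_skill : List Int) : Prop :=
  charles_skill.length ≤ delilas_skill.length
instance (k : Int) (charles_skill : List Int) (delilas_skill : List Int) : Decidable (Pre_solve k charles_skill delilas_skill) := by unfold Pre_solve; infer_instance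
def pvWitness_solve : Int × List Int × List Int := (1, [3, 1], [2, 4])

def Spec_solve (k : Int) (charles_skill : List Int) (delilas_skill : List Int) (out : Int) : Prop := out = solve_alt k charles_skill delilas_skill
instance (k : Int) (charles_skill : List Int) (delilas_skill : List Int) (out : Int) : Decidable (Spec_solve k charles_skill delilas_skill out) := by unfold Spec_solve; infer_instance

-- ===== CLAIM (what is proved, stated in full; the proofs are below) =====
def Claim_equal_solve : Prop := ∀ (k : Int) (charles_skill : List Int) (delilas_skill : List Int), Dom_solve k charles_skill delilas_skill → Pre_solve k charles_skill delilas_skill → Spec_solve k charles_skill delilas_skill (solve k charles_skill delilas_skill)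

-- ===== LEMMAS AND PROOFS =====

-- max(sub) for nonempty sub, as the proofs use it
def mx (sub : List Int) : Int := (PySem.List.max? sub (fun y => y)).getD 0

-- the maxima of all width-w windows, in order of start position
def rowSpec (xs : List Int) (w : Nat) : List Int :=
  (List.range (xs.length + 1 - w)).map (fun s => mx ((xs.drop s).take w))

-- all contiguous subarrays, by width then start (A's order)
def subsSpec (xs : List Int) : List (List Int) :=
  (List.range xs.length).flatMap (fun j => (List.range (xs.length - j)).map (fun s => (xs.drop s).take (j + 1)))

lemma mx_cons (x : Int) (t : List Int) : mx (x :: t) = t.foldl max x := by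
  rw [mx, PySem.List.max?_id_cons]; rfl

lemma mx_append_singleton (x : Int) (t : List Int) (y : Int) :
    mx ((x :: t) ++ [y]) = max (mx (x :: t)) y := by
  simp only [List.cons_append, mx_cons, List.foldl_append, List.foldl_cons, List.foldl_nil]

lemma rowSpec_one (xs : List Int) : rowSpec xs 1 = xs := by
  apply List.ext_getElem
  · simp [rowSpec]
  · intro s h1 h2
    simp only [rowSpec, List.getElem_map, List.getElem_range]
    rw [List.drop_eq_getElem_cons h2]
    simp only [List.take_succ_cons, List.take_zero, mx_cons, List.foldl_nil]

lemma rowSpec_step (xs : List Int) (w s : Nat) (hw : 1 ≤ w) (hs : s + w < xs.length) :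
    mx ((xs.drop s).take (w + 1)) = max (mx ((xs.drop s).take w)) (xs.getD (s + w) 0) := by
  have hget : (xs.drop s)[w]? = some xs[s + w] := by
    rw [List.getElem?_drop]
    exact List.getElem?_eq_getElem (by omega)
  rw [List.take_add_one, hget]
  have hne : (xs.drop s).take w ≠ [] := by
    simp [List.take_eq_nil_iff]
    omega
  obtain ⟨a, t, ht⟩ := List.exists_cons_of_ne_nil hne
  rw [ht, Option.toList_some, mx_append_singleton, List.getD_eq_getElem xs 0 (by omega)]

lemma step_row (xs : List Int) (w : Nat) (hw : 1 ≤ w) (hn : w ≤ xs.length) :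
    (PySem.List.pyRange 0 ((xs.length : Int) - (w : Int)) 1).map
      (fun s => max (PySem.List.pyGetD (rowSpec xs w) s 0) (PySem.List.pyGetD xs (s + (w : Int)) 0))
    = rowSpec xs (w + 1) := by
  rw [PySem.List.pyRange_one]
  have htn : (((xs.length : Int) - (w : Int)) - 0).toNat = xs.length - w := by omega
  rw [htn, List.map_map]
  apply List.ext_getElem
  · simp [rowSpec]
  · intro t h1 h2
    simp only [List.getElem_map, List.getElem_range, Function.comp_apply]
    have h1' : t < xs.length - w := by simpa using h1
    have e1 : (0 : Int) + (t : Int) = ((t : Nat) : Int) := by omega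
    rw [e1, PySem.List.pyGetD_natCast]
    have e2 : ((t : Nat) : Int) + (w : Int) = (((t + w : Nat)) : Int) := by push_cast; ring
    rw [e2, PySem.List.pyGetD_natCast]
    have e3 : (rowSpec xs w).getD t 0 = mx ((xs.drop t).take w) := by
      rw [List.getD_eq_getElem _ _ (by simp [rowSpec]; omega)]
      simp [rowSpec]
    rw [e3]
    simp only [rowSpec, List.getElem_map, List.getElem_range]
    exact (rowSpec_step xs w t hw (by omega)).symm

lemma fold_inv (xs : List Int) (c : Nat) : ∀ (w : Nat) (out : List Int), 1 ≤ w → w + c = xs.length + 1 →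
    ((PySem.List.pyRange (w : Int) ((xs.length : Int) + 1) 1).foldl
      (fun (st : List Int × List Int) w' =>
        (st.1 ++ st.2,
         (PySem.List.pyRange 0 ((xs.length : Int) - w') 1).map
           (fun s => max (PySem.List.pyGetD st.2 s 0) (PySem.List.pyGetD xs (s + w') 0))))
      (out, rowSpec xs w)).1
    = out ++ (List.range c).flatMap (fun j => rowSpec xs (w + j)) := by
  induction c with
  | zero =>
    intro w out hw hc
    rw [PySem.List.pyRange_one_eq_nil (by omega)]
    simp
  | succ c ih =>
    intro w out hw hc
    rw [PySem.List.pyRange_one_cons (by omega)]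
    rw [List.foldl_cons]
    have hrow := step_row xs w hw (by omega)
    simp only [hrow]
    have e1 : ((w : Int) + 1) = (((w + 1 : Nat)) : Int) := by push_cast; ring
    rw [e1, ih (w + 1) (out ++ rowSpec xs w) (by omega) (by omega)]
    rw [List.range_succ_eq_map]
    simp only [List.flatMap_cons, List.flatMap_map, Nat.add_zero, List.append_assoc]
    congr 2
    apply List.flatMap_congr  -- maybe wrong name
    intro j hj
    congr 1
    omega

lemma window_maxima_eq (xs : List Int) : window_maxima xs = (subsSpec xs).map mx := by
  unfold window_maxima
  have := fold_inv xs xs.length 1 [] (by omega) (by omega)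
  rw [rowSpec_one] at this
  simp only [Nat.cast_one] at this
  rw [this]
  simp only [List.nil_append, subsSpec, List.map_flatMap]
  apply List.flatMap_congr
  intro j hj
  have hj' : j < xs.length := List.mem_range.mp hj
  rw [rowSpec, List.map_map]
  have hl : xs.length + 1 - (j + 1) = xs.length - j := by omega
  simp only [Nat.add_comm 1 j, hl, Function.comp_def]

lemma gen_eq (xs : List Int) : generate_cont_subarrays xs = subsSpec xs := by
  unfold generate_cont_subarrays
  simp only [PySem.List.foldl_append_singleton_eq_map, PySem.List.foldl_append_eq_flatMap]
  rw [List.nil_append, PySem.List.pyRange_one 1 ((xs.length : Int) + 1)]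
  have h1 : (((xs.length : Int) + 1) - 1).toNat = xs.length := by omega
  rw [h1, List.flatMap_map]
  unfold subsSpec
  apply List.flatMap_congr
  intro j hj
  have hj' : j < xs.length := List.mem_range.mp hj
  rw [PySem.List.pyRange_one]
  have h2 : ((xs.length : Int) - (1 + (j : Int)) + 1 - 0).toNat = xs.length - j := by omega
  rw [h2, List.map_map]
  apply List.map_congr_left
  intro s hs
  simp only [Function.comp_apply, zero_add]
  have e : (1 : Int) + (j : Int) = (((j + 1 : Nat)) : Int) := by push_cast; ring
  rw [e, PySem.List.slice_natCast_add]

lemma tri_eq (n : Nat) : ∑ j ∈ Finset.range n, (n - j) = ∑ j ∈ Finset.range n, (j + 1) := by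
  rw [← Finset.sum_range_reflect (fun j => j + 1) n]
  apply Finset.sum_congr rfl
  intro j hj
  have := Finset.mem_range.mp hj
  omega

lemma subsSpec_len (zs : List Int) : (subsSpec zs).length = ∑ j ∈ Finset.range zs.length, (zs.length - j) := by
  simp [subsSpec, List.length_flatMap]
  rfl

lemma subsSpec_length_mono (xs ys : List Int) (h : xs.length ≤ ys.length) :
    (subsSpec xs).length ≤ (subsSpec ys).length := by
  rw [subsSpec_len, subsSpec_len, tri_eq, tri_eq]
  apply Finset.sum_le_sum_of_subset
  intro x hx
  simp only [Finset.mem_range] at hx ⊢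
  omega

lemma fold_count_zip (k : Int) (L1 L2 : List (List Int)) (h : L1.length ≤ L2.length) :
    (PySem.List.pyRange 0 (L1.length : Int) 1).foldl
      (fun (pairs : Int) i =>
        if |(PySem.List.max? (PySem.List.pyGetD L1 i []) (fun y => y)).getD 0 -
            (PySem.List.max? (PySem.List.pyGetD L2 i []) (fun y => y)).getD 0| ≤ k
        then pairs + 1 else pairs) 0
    = ((L1.map mx).zip (L2.map mx)).foldl
        (fun (pairs : Int) cd => if |cd.1 - cd.2| ≤ k then pairs + 1 else pairs) 0 := by
  have h1 : (PySem.List.pyRange 0 (L1.length : Int) 1).foldl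
      (fun (pairs : Int) i =>
        if |(PySem.List.max? (PySem.List.pyGetD L1 i []) (fun y => y)).getD 0 -
            (PySem.List.max? (PySem.List.pyGetD L2 i []) (fun y => y)).getD 0| ≤ k
        then pairs + 1 else pairs) 0
      = ((PySem.List.pyRange 0 (L1.length : Int) 1).map
          (fun i => ((PySem.List.max? (PySem.List.pyGetD L1 i []) (fun y => y)).getD 0,
                     (PySem.List.max? (PySem.List.pyGetD L2 i []) (fun y => y)).getD 0))).foldl
          (fun (pairs : Int) cd => if |cd.1 - cd.2| ≤ k then pairs + 1 else pairs) 0 :=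
    (List.foldl_map (f := fun i => ((PySem.List.max? (PySem.List.pyGetD L1 i []) (fun y => y)).getD 0,
                     (PySem.List.max? (PySem.List.pyGetD L2 i []) (fun y => y)).getD 0))
      (g := fun (pairs : Int) cd => if |cd.1 - cd.2| ≤ k then pairs + 1 else pairs)).symm
  rw [h1]
  congr 1
  apply List.ext_getElem
  · simp [PySem.List.length_pyRange_one, h]
  · intro t ht1 ht2
    have htL1 : t < L1.length := by
      simp [PySem.List.length_pyRange_one] at ht1
      omega
    simp only [List.getElem_map, List.getElem_zip]
    rw [PySem.List.getElem_pyRange_one]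
    simp only [zero_add, PySem.List.pyGetD_natCast]
    rw [List.getD_eq_getElem _ _ htL1, List.getD_eq_getElem _ _ (lt_of_lt_of_le htL1 h)]
    simp [mx]

-- ===== VERDICT (by name: the statement is the Claim_ definition above) =====
theorem solve_spec : Claim_equal_solve := by
  intro k cs ds _ hpre
  unfold Spec_solve solve solve_alt
  simp only [gen_eq, window_maxima_eq]
  exact fold_count_zip k (subsSpec cs) (subsSpec ds) (subsSpec_length_mono cs ds hpre)
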